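-- pv_equiv track=rewrite | github.com/Michaszek224/praktykaiszeregowaniezadan | zadanie1/algorytmy2/156935.py | make_batches_greedy_edd
-- ===== SOURCE A (Python) =====
-- def batch_lateness(batch, completion_time):
--     # batch: lista (id, p, d)
--     return sum(max(0, completion_time - d) for _, _, d in batch)
--
-- def make_batches_greedy_edd(tasks, setup_time):
--     """
--     Heurystyka:
--     - sortujemy EDD (rosnąco po d),
--     - po kolei dokładamy zadania; dla każdego zadania porównujemy:
--         A) dodać do bieżącej paczki
--         B) zamknąć bieżącą paczkę i zacząć nową z tym zadaniem
--       Wybieramy wariant o mniejszym natychmiastowym koszcie spóźnień.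
--     """
--     # EDD
--     tasks_sorted = sorted(tasks, key=lambda x: x[2])  # po d
--
--     batches = []
--     current_batch = []
--
--     t_prev = 0
--     first_batch_done = False
--
--
--     P_B = 0
--
--     for task in tasks_sorted:
--         task_id, p_j, d_j = task
--
--         if not current_batch:
--             current_batch = [task]
--             P_B = p_j
--             continue
--
--         C_A = t_prev + P_B + p_j
--         lateness_A = batch_lateness(current_batch + [task], C_A)
--
--         C_close = t_prev + P_B
--         lateness_close = batch_lateness(current_batch, C_close)
--
--
--         C_B = C_close + (0 if not batches and not first_batch_done else 0) + setup_time + p_j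
--
--         lateness_B = lateness_close + max(0, C_B - d_j)
--
--
--         if lateness_A <= lateness_B:
--             current_batch.append(task)
--             P_B += p_j
--         else:
--             batches.append(current_batch)
--             first_batch_done = True
--             t_prev = C_close
--             current_batch = [task]
--             P_B = p_j
--
--     # domknięcie ostatniej paczki
--     if current_batch:
--         batches.append(current_batch)
--
--     return batches
-- ===== SOURCE B (Python) =====
-- def _lateness(ds, pre, C):
--     # ds: nondecreasing due dates of the current batch, pre: prefix sums of ds.
--     # sum(max(0, C - d) for d in ds) = k*C - pre[k], where k = #(d < C),
--     # found by binary search (bisect_left).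
--     lo, hi = 0, len(ds)
--     while lo < hi:
--         mid = (lo + hi) // 2
--         if ds[mid] < C:
--             lo = mid + 1
--         else:
--             hi = mid
--     return lo * C - pre[lo]
--
-- def make_batches_greedy_edd(tasks, setup_time):
--     ts = sorted(tasks, key=lambda x: x[2])
--     # Phase 1: decide only the SIZES of consecutive batches of the EDD order,
--     # keeping the current batch's due dates with prefix sums; each lateness
--     # is computed by a binary search instead of rescanning the batch.
--     sizes = []
--     k = 0          # size of the current batch
--     ds = []        # due dates of the current batch (nondecreasing)
--     pre = [0]      # prefix sums of ds
--     t_prev = 0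
--     P_B = 0
--     for _, p, d in ts:
--         if k == 0:
--             k, ds, pre, P_B = 1, [d], [0, d], p
--             continue
--         C_close = t_prev + P_B
--         C_A = C_close + p
--         lateness_A = _lateness(ds, pre, C_A) + max(0, C_A - d)
--         lateness_B = _lateness(ds, pre, C_close) + max(0, C_close + setup_time + p - d)
--         if lateness_A <= lateness_B:
--             k += 1
--             ds.append(d)
--             pre.append(pre[-1] + d)
--             P_B += p
--         else:
--             sizes.append(k)
--             t_prev = C_close
--             k, ds, pre, P_B = 1, [d], [0, d], p
--     if k:
--         sizes.append(k)
--     # Phase 2: the batches are just the sorted list split at those sizes.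
--     out = []
--     rest = ts
--     for s in sizes:
--         out.append(rest[:s])
--         rest = rest[s:]
--     return out
-- ===== Notes on version B (the rewrite author's own statement) =====
-- stated objective: faster
-- what changed: A carries the batches themselves and recomputes each batch's whole lateness sum per task; B runs a first pass that only decides batch SIZES, computing each lateness from prefix sums of the current batch's due dates via binary search, then a second pass that splits the sorted list at those sizes.
import Mathlib
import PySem

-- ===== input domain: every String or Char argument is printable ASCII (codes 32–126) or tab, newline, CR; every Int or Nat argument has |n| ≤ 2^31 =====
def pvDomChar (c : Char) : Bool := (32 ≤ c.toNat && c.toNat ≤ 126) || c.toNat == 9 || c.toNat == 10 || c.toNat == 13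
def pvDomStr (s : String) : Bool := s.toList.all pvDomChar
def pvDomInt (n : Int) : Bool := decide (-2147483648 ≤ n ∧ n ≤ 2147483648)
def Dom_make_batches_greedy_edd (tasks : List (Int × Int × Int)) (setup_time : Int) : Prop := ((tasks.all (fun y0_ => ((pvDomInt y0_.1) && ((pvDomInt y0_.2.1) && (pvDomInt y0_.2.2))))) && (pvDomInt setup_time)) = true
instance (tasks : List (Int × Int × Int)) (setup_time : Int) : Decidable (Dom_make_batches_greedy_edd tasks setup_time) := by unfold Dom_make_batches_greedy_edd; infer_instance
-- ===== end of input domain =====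

-- B decides only the batch sizes in a first pass, computing each lateness from prefix
-- sums of the current batch's due dates via binary search, then splits the sorted
-- list at those sizes; objective: faster.

-- ===== PORT A =====
def batch_lateness (batch : List (Int × Int × Int)) (completion_time : Int) : Int :=
  batch.foldl (fun s t => s + max 0 (completion_time - t.2.2)) 0

def loopA (setup_time : Int) :
    List (Int × Int × Int) → List (List (Int × Int × Int)) → List (Int × Int × Int) →
    Int → Bool → Int → List (List (Int × Int × Int)) × List (Int × Int × Int)
  | [], batches, cur, _, _, _ => (batches, cur)
  | task :: rest, batches, cur, t_prev, first_batch_done, P_B =>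
    if cur = [] then
      loopA setup_time rest batches [task] t_prev first_batch_done task.2.1
    else
      let C_A := t_prev + P_B + task.2.1
      let lateness_A := batch_lateness (cur ++ [task]) C_A
      let C_close := t_prev + P_B
      let lateness_close := batch_lateness cur C_close
      let C_B := C_close + (if batches = [] ∧ first_batch_done = false then 0 else 0) + setup_time + task.2.1
      let lateness_B := lateness_close + max 0 (C_B - task.2.2)
      if lateness_A ≤ lateness_B then
        loopA setup_time rest batches (cur ++ [task]) t_prev first_batch_done (P_B + task.2.1)
      else
        loopA setup_time rest (batches ++ [cur]) [task] C_close true task.2.1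

def make_batches_greedy_edd (tasks : List (Int × Int × Int)) (setup_time : Int) : List (List (Int × Int × Int)) :=
  let tasks_sorted := PySem.List.sorted tasks (fun x => x.2.2)
  let r := loopA setup_time tasks_sorted [] [] 0 false 0
  if r.2 = [] then r.1 else r.1 ++ [r.2]

-- ===== PORT B =====
-- Source B's hand-written binary-search loop is exactly bisect_left; PySem.List.bisectLeft is that loop.
def latB (ds pre : List Int) (C : Int) : Int :=
  let lo := PySem.List.bisectLeft ds C
  (lo : Int) * C - pre.getD lo 0

-- phase 1 of Source B: only the size k of the current batch is carried, and the closed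
-- sizes are accumulated; k is a count, so it is a Nat here.
def phase1 (setup_time : Int) :
    List (Int × Int × Int) → List Nat → Nat → List Int → List Int → Int → Int → List Nat
  | [], sizes, k, _, _, _, _ => if k = 0 then sizes else sizes ++ [k]
  | task :: rest, sizes, k, ds, pre, t_prev, P_B =>
    if k = 0 then
      phase1 setup_time rest sizes 1 [task.2.2] [0, task.2.2] t_prev task.2.1
    else
      let C_close := t_prev + P_B
      let C_A := C_close + task.2.1
      let lateness_A := latB ds pre C_A + max 0 (C_A - task.2.2)
      let lateness_B := latB ds pre C_close + max 0 (C_close + setup_time + task.2.1 - task.2.2)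
      if lateness_A ≤ lateness_B then
        phase1 setup_time rest sizes (k + 1) (ds ++ [task.2.2])
          (pre ++ [PySem.List.pyGetD pre (-1) 0 + task.2.2]) t_prev (P_B + task.2.1)
      else
        phase1 setup_time rest (sizes ++ [k]) 1 [task.2.2] [0, task.2.2] C_close task.2.1

-- phase 2 of Source B: rest[:s] / rest[s:] with the nonnegative size s are exactly take/drop.
def chunk : List (Int × Int × Int) → List Nat → List (List (Int × Int × Int))
  | _, [] => []
  | rest, s :: ss => rest.take s :: chunk (rest.drop s) ss

def make_batches_greedy_edd_alt (tasks : List (Int × Int × Int)) (setup_time : Int) : List (List (Int × Int × Int)) :=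
  let ts := PySem.List.sorted tasks (fun x => x.2.2)
  chunk ts (phase1 setup_time ts [] 0 [] [0] 0 0)

-- ===== PRECONDITION & SPEC =====
def Spec_make_batches_greedy_edd (tasks : List (Int × Int × Int)) (setup_time : Int) (out : List (List (Int × Int × Int))) : Prop := out = make_batches_greedy_edd_alt tasks setup_time
instance (tasks : List (Int × Int × Int)) (setup_time : Int) (out : List (List (Int × Int × Int))) : Decidable (Spec_make_batches_greedy_edd tasks setup_time out) := by unfold Spec_make_batches_greedy_edd; infer_instance

-- ===== CLAIM (what is proved, stated in full; the proofs are below) =====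
def Claim_equal_make_batches_greedy_edd : Prop := ∀ (tasks : List (Int × Int × Int)) (setup_time : Int), Dom_make_batches_greedy_edd tasks setup_time → Spec_make_batches_greedy_edd tasks setup_time (make_batches_greedy_edd tasks setup_time)

-- ===== LEMMAS AND PROOFS =====

-- the lateness fold over due dates all below C
lemma foldl_lat_lt (C : Int) : ∀ (l : List Int), (∀ d ∈ l, d < C) → ∀ a : Int,
    l.foldl (fun s d => s + max 0 (C - d)) a = a + (l.length : Int) * C - l.sum := by
  intro l
  induction l with
  | nil => intro _ a; simp
  | cons d t ih =>
    intro h a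
    have hd : d < C := h d (by simp)
    have : max 0 (C - d) = C - d := by omega
    simp only [List.foldl_cons, this, ih (fun x hx => h x (by simp [hx]))]
    simp only [List.length_cons, List.sum_cons]
    push_cast
    ring

-- the lateness fold over due dates all at least C
lemma foldl_lat_ge (C : Int) : ∀ (l : List Int), (∀ d ∈ l, C ≤ d) → ∀ a : Int,
    l.foldl (fun s d => s + max 0 (C - d)) a = a := by
  intro l
  induction l with
  | nil => intro _ a; simp
  | cons d t ih =>
    intro h a
    have hd : C ≤ d := h d (by simp)
    have : max 0 (C - d) = 0 := by omega
    simp only [List.foldl_cons, this, add_zero]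
    exact ih (fun x hx => h x (by simp [hx])) a

-- the prefix-sum invariant B maintains for `pre`
def PreInv (ds pre : List Int) : Prop :=
  pre.length = ds.length + 1 ∧ ∀ k, k ≤ ds.length → pre.getD k 0 = (ds.take k).sum

lemma preInv_single (d : Int) : PreInv [d] [0, d] := by
  constructor
  · simp
  · intro k hk
    simp only [List.length_cons, List.length_nil] at hk
    interval_cases k <;> simp [List.getD]

-- latB computes the lateness fold, given sortedness and the prefix-sum invariant
lemma latB_eq (ds pre : List Int) (C : Int)
    (hs : ds.Pairwise (· ≤ ·)) (hinv : PreInv ds pre) :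
    latB ds pre C = ds.foldl (fun s d => s + max 0 (C - d)) 0 := by
  obtain ⟨hlen, hpre⟩ := hinv
  obtain ⟨hle, hlt, hge⟩ := PySem.List.bisectLeft_spec ds C hs
  set r := PySem.List.bisectLeft ds C with hr
  have hsplit : ds = ds.take r ++ ds.drop r := (List.take_append_drop r ds).symm
  have hlt' : ∀ d ∈ ds.take r, d < C := by
    intro d hd
    obtain ⟨i, hi, hget⟩ := List.mem_iff_getElem.mp hd
    simp only [List.length_take] at hi
    have h1 : i < r := by omega
    have h2 : i < ds.length := by omega
    rw [List.getElem_take] at hget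
    exact hget ▸ hlt i h2 h1
  have hge' : ∀ d ∈ ds.drop r, C ≤ d := by
    intro d hd
    obtain ⟨i, hi, hget⟩ := List.mem_iff_getElem.mp hd
    simp only [List.length_drop] at hi
    rw [List.getElem_drop] at hget
    exact hget ▸ hge (r + i) (by omega) (by omega)
  have hlentake : (ds.take r).length = r := by simp [List.length_take]; omega
  calc latB ds pre C
      = (r : Int) * C - pre.getD r 0 := rfl
    _ = (r : Int) * C - (ds.take r).sum := by rw [hpre r hle]
    _ = ds.foldl (fun s d => s + max 0 (C - d)) 0 := by
        conv_rhs => rw [hsplit]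
        rw [List.foldl_append, foldl_lat_lt C _ hlt', foldl_lat_ge C _ hge', hlentake]
        ring

-- batch_lateness is the fold over the mapped due dates
lemma batch_lateness_eq_fold (batch : List (Int × Int × Int)) (C : Int) :
    batch_lateness batch C = (batch.map (fun t => t.2.2)).foldl (fun s d => s + max 0 (C - d)) 0 := by
  simp [batch_lateness, List.foldl_map]

-- pre[-1] is the sum of ds under the invariant
lemma pyGetD_neg_one_eq_sum (ds pre : List Int) (hinv : PreInv ds pre) :
    PySem.List.pyGetD pre (-1) 0 = ds.sum := by
  obtain ⟨hlen, hpre⟩ := hinv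
  have h := hpre ds.length (le_refl _)
  rw [List.take_length] at h
  rw [← h]
  simp only [PySem.List.pyGetD, PySem.List.pyGet?, PySem.List.pyIdx?]
  rw [if_neg (by omega : ¬ (0:Int) ≤ -1), if_pos (by omega : -(pre.length:Int) ≤ -1)]
  have h4 : pre.length - 1 = ds.length := by omega
  simp [h4, List.getD_eq_getElem?_getD]

-- invariant preservation: appending one due date
lemma preInv_append (ds pre : List Int) (d : Int) (hinv : PreInv ds pre) :
    PreInv (ds ++ [d]) (pre ++ [PySem.List.pyGetD pre (-1) 0 + d]) := by
  obtain ⟨hlen, hpre⟩ := hinv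
  constructor
  · simp [hlen]
  · intro k hk
    simp only [List.length_append, List.length_cons, List.length_nil] at hk
    by_cases hk' : k ≤ ds.length
    · have hklt : k < pre.length := by omega
      rw [List.getD_append pre _ 0 k hklt, List.take_append_of_le_length hk', hpre k hk']
    · have hkeq : k = ds.length + 1 := by omega
      subst hkeq
      rw [List.getD_append_right pre _ 0 _ (by omega)]
      simp only [hlen]
      rw [pyGetD_neg_one_eq_sum ds pre ⟨hlen, hpre⟩]
      have ht : (ds ++ [d]).take (ds.length + 1) = ds ++ [d] := by
        apply List.take_of_length_le; simp
      rw [ht]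
      simp [List.getD]

-- phase 1 produces exactly the lengths of loopA's batches (closed ones, then the open one)
lemma loop_sizes (setup_time : Int) :
    ∀ (rem : List (Int × Int × Int)) (batches : List (List (Int × Int × Int)))
      (cur : List (Int × Int × Int)) (t_prev : Int) (first_batch_done : Bool) (P_B : Int)
      (ds pre : List Int),
      rem.Pairwise (fun a b => a.2.2 ≤ b.2.2) →
      (∀ x ∈ cur, ∀ y ∈ rem, x.2.2 ≤ y.2.2) →
      ds = cur.map (fun t => t.2.2) →
      ds.Pairwise (· ≤ ·) →
      PreInv ds pre →
      phase1 setup_time rem (batches.map List.length) cur.length ds pre t_prev P_B =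
        (loopA setup_time rem batches cur t_prev first_batch_done P_B).1.map List.length
          ++ (if (loopA setup_time rem batches cur t_prev first_batch_done P_B).2 = [] then []
              else [(loopA setup_time rem batches cur t_prev first_batch_done P_B).2.length]) := by
  intro rem
  induction rem with
  | nil =>
    intro batches cur _ _ _ _ _ _ _ _ _ _
    simp only [loopA, phase1]
    by_cases hc : cur = []
    · subst hc; simp
    · rw [if_neg hc, if_neg (by simpa using hc)]
  | cons task rest ih =>
    intro batches cur t_prev first_batch_done P_B ds pre hrem hcurrem hds hsort hinv
    subst hds
    have hremrest : rest.Pairwise (fun a b => a.2.2 ≤ b.2.2) := hrem.of_cons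
    have htaskrest : ∀ y ∈ rest, task.2.2 ≤ y.2.2 := by
      intro y hy; exact (List.pairwise_cons.mp hrem).1 y hy
    by_cases hc : cur = []
    · subst hc
      simp only [loopA, phase1, List.length_nil, List.map_nil]
      have := ih batches [task] t_prev first_batch_done task.2.1 [task.2.2] [0, task.2.2]
        hremrest
        (by intro x hx y hy; simp only [List.mem_singleton] at hx; subst hx; exact htaskrest y hy)
        (by simp) (by simp) (preInv_single task.2.2)
      simpa using this
    · have hk0 : cur.length ≠ 0 := by simpa using hc
      simp only [loopA, phase1, if_neg hc, if_neg hk0]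
      have hlatA : batch_lateness (cur ++ [task]) (t_prev + P_B + task.2.1) =
          latB (cur.map (fun t => t.2.2)) pre (t_prev + P_B + task.2.1)
            + max 0 (t_prev + P_B + task.2.1 - task.2.2) := by
        rw [batch_lateness_eq_fold, latB_eq _ pre _ hsort hinv, List.map_append, List.foldl_append]
        simp
      have hlatClose : batch_lateness cur (t_prev + P_B) =
          latB (cur.map (fun t => t.2.2)) pre (t_prev + P_B) := by
        rw [batch_lateness_eq_fold, latB_eq _ pre _ hsort hinv]
      have hCB : (if batches = [] ∧ first_batch_done = false then (0:Int) else 0) = 0 := ite_self 0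
      have hcurle : ∀ x ∈ cur, x.2.2 ≤ task.2.2 := by
        intro x hx; exact hcurrem x hx task (by simp)
      simp only [hCB, add_zero]
      have hsort' : ((cur ++ [task]).map (fun t => t.2.2)).Pairwise (· ≤ ·) := by
        rw [List.map_append]
        apply List.pairwise_append.mpr
        refine ⟨hsort, by simp, ?_⟩
        intro a ha b hb
        simp only [List.map_cons, List.map_nil, List.mem_singleton] at hb
        subst hb
        obtain ⟨x, hx, hxa⟩ := List.mem_map.mp ha
        subst hxa
        exact hcurle x hx
      by_cases hcond : batch_lateness (cur ++ [task]) (t_prev + P_B + task.2.1) ≤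
          batch_lateness cur (t_prev + P_B) + max 0 (t_prev + P_B + setup_time + task.2.1 - task.2.2)
      · rw [if_pos hcond,
          if_pos (by rw [← hlatA, ← hlatClose]; convert hcond using 3)]
        have := ih batches (cur ++ [task]) t_prev first_batch_done (P_B + task.2.1)
          ((cur ++ [task]).map (fun t => t.2.2))
          (pre ++ [PySem.List.pyGetD pre (-1) 0 + task.2.2])
          hremrest
          (by
            intro x hx y hy
            rcases List.mem_append.mp hx with h | h
            · exact le_trans (hcurrem x h task (by simp)) (htaskrest y hy)
            · simp only [List.mem_singleton] at h; subst h; exact htaskrest y hy)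
          rfl hsort'
          (by simpa [List.map_append] using preInv_append _ pre task.2.2 hinv)
        simpa [List.map_append] using this
      · rw [if_neg hcond,
          if_neg (by rw [← hlatA, ← hlatClose]; intro h; exact hcond (by convert h using 3))]
        have := ih (batches ++ [cur]) [task] (t_prev + P_B) true task.2.1
          [task.2.2] [0, task.2.2]
          hremrest
          (by intro x hx y hy; simp only [List.mem_singleton] at hx; subst hx; exact htaskrest y hy)
          (by simp) (by simp) (preInv_single task.2.2)
        simpa [List.map_append] using this

-- loopA processes every remaining task: the result's flatten is the processed input
lemma loopA_flatten (setup_time : Int) :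
    ∀ (rem : List (Int × Int × Int)) (batches : List (List (Int × Int × Int)))
      (cur : List (Int × Int × Int)) (t_prev : Int) (fbd : Bool) (P_B : Int),
      (loopA setup_time rem batches cur t_prev fbd P_B).1.flatten
        ++ (loopA setup_time rem batches cur t_prev fbd P_B).2
        = batches.flatten ++ cur ++ rem := by
  intro rem
  induction rem with
  | nil => intro batches cur _ _ _; simp [loopA]
  | cons task rest ih =>
    intro batches cur t_prev fbd P_B
    by_cases hc : cur = []
    · subst hc
      rw [show loopA setup_time (task :: rest) batches [] t_prev fbd P_B
            = loopA setup_time rest batches [task] t_prev fbd task.2.1 from by simp [loopA]]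
      rw [ih]
      simp
    · simp only [loopA, if_neg hc]
      split_ifs <;> (rw [ih]; simp)

-- splitting a flattened list at the constituent lengths recovers the lists
lemma chunk_map_length :
    ∀ (bs : List (List (Int × Int × Int))) (t : List (Int × Int × Int)) (ss : List Nat),
      chunk (bs.flatten ++ t) (bs.map List.length ++ ss) = bs ++ chunk t ss := by
  intro bs
  induction bs with
  | nil => intro t ss; simp
  | cons b rest ih =>
    intro t ss
    simp only [List.flatten_cons, List.map_cons, List.cons_append, chunk]
    rw [List.append_assoc, List.take_left, List.drop_left, ih]

-- ===== VERDICT (by name: the statement is the Claim_ definition above) =====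
theorem make_batches_greedy_edd_spec : Claim_equal_make_batches_greedy_edd := by
  intro tasks setup_time _
  unfold Spec_make_batches_greedy_edd
  have hsz := loop_sizes setup_time (PySem.List.sorted tasks (fun x => x.2.2)) [] [] 0 false 0 [] [0]
    (PySem.List.sorted_pairwise tasks (fun x => x.2.2))
    (by intro x hx; simp at hx)
    (by simp) (by simp)
    ⟨by simp, by intro k hk; simp only [List.length_nil] at hk; interval_cases k; simp [List.getD]⟩
  have hfl := loopA_flatten setup_time (PySem.List.sorted tasks (fun x => x.2.2)) [] [] 0 false 0
  simp only [List.map_nil, List.length_nil] at hsz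
  set r := loopA setup_time (PySem.List.sorted tasks (fun x => x.2.2)) [] [] 0 false 0 with hr
  simp only [List.flatten_nil, List.nil_append] at hfl
  show (if r.2 = [] then r.1 else r.1 ++ [r.2])
      = chunk (PySem.List.sorted tasks (fun x => x.2.2))
          (phase1 setup_time (PySem.List.sorted tasks (fun x => x.2.2)) [] 0 [] [0] 0 0)
  rw [hsz, ← hfl]
  by_cases h2 : r.2 = []
  · simp only [h2, List.append_nil]
    have := chunk_map_length r.1 [] []
    simpa [chunk] using this.symm
  · rw [if_neg h2, if_neg h2]
    rw [chunk_map_length r.1 r.2 [r.2.length]]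
    simp [chunk]
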